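-- pv_equiv track=rewrite | github.com/manoel-alves/Sistema_Hospitalar | utils/validacoes.py | valida_cep
-- ===== SOURCE A (Python) =====
-- def valida_cep(cep:str):
--     # xxxxx-xxx
--     if len(cep) != 9:
--         return False
--
--     for i in range(len(cep)):
--         if i == 5:
--             if cep[i] != '-':
--                 return False
--         else:
--             if not cep[i].isdigit:
--                 return False
--
--     return True
-- ===== SOURCE B (Python) =====
-- def valida_cep(cep: str):
--     # length must be 9 and the separator at index 5; A's `cep[i].isdigit`
--     # (missing call parentheses) is always truthy, so no digit check applies.
--     return len(cep) == 9 and cep[5] == '-'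
-- ===== Notes on version B (the rewrite author's own statement) =====
-- stated objective: simpler
-- what changed: Replaced the per-index loop with a single short-circuit boolean (length == 9 and dash at index 5); A's unparenthesized `.isdigit` never checks digits, so the loop is redundant.
import Mathlib
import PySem

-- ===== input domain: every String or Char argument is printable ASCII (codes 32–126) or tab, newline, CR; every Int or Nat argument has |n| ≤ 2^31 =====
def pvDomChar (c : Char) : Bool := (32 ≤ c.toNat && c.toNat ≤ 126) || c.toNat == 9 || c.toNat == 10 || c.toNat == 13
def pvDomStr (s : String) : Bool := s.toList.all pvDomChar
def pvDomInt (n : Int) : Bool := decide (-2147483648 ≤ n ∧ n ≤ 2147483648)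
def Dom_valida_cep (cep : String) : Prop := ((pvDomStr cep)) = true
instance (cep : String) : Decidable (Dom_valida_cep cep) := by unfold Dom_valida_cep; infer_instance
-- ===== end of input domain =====

-- B: single short-circuit boolean (length == 9 and dash at index 5); A's unparenthesized `.isdigit` is always truthy, so the loop adds nothing.
-- ===== PORT A =====
-- the for-loop with early return, recursing over the range list
def validaCepLoopA (chars : List Char) : List Int → Bool
  | [] => true
  | i :: rest =>
    if i == 5 then
      if (PySem.List.pyGet? chars i).getD ' ' != '-' then false
      else validaCepLoopA chars rest
    else
      -- `cep[i].isdigit` is a bound method object, always truthy: `not truthy` is False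
      if !true then false
      else validaCepLoopA chars rest

def valida_cep (cep : String) : Bool :=
  let chars := cep.toList
  if chars.length ≠ 9 then false
  else validaCepLoopA chars (PySem.List.pyRange 0 chars.length 1)

-- ===== PORT B =====
def valida_cep_alt (cep : String) : Bool :=
  decide (cep.toList.length = 9) && ((PySem.List.pyGet? cep.toList 5).getD ' ' == '-')

-- ===== PRECONDITION & SPEC =====
def Spec_valida_cep (cep : String) (out : Bool) : Prop := out = valida_cep_alt cep
instance (cep : String) (out : Bool) : Decidable (Spec_valida_cep cep out) := by unfold Spec_valida_cep; infer_instance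

-- ===== CLAIM (what is proved, stated in full; the proofs are below) =====
def Claim_equal_valida_cep : Prop := ∀ (cep : String), Dom_valida_cep cep → Spec_valida_cep cep (valida_cep cep)

-- ===== LEMMAS AND PROOFS =====

-- ===== VERDICT (by name: the statement is the Claim_ definition above) =====
theorem valida_cep_spec : Claim_equal_valida_cep := by
  intro cep _
  unfold Spec_valida_cep valida_cep valida_cep_alt
  by_cases h : cep.toList.length = 9
  · have hr : PySem.List.pyRange 0 (9 : Int) 1 = [0,1,2,3,4,5,6,7,8] := by decide
    simp [h, hr, validaCepLoopA, Bool.beq_eq_decide_eq]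
  · have h' : ¬ cep.length = 9 := by simpa using h
    simp [h']
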